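-- pv_equiv track=rewrite | github.com/mitch-codes/alx-higher_level_programming | 0x01-python-if_else_loops_functions/9-print_last_digit.py | print_last_digit
-- ===== SOURCE A (Python) =====
-- def print_last_digit(number):
--     mynumber = number
--     length = len(str(mynumber))
--     if mynumber < 0:
--         mynumber = mynumber * -1
--     for i in range(length - 1):
--         mynumber = mynumber % 10
--     return mynumber
-- ===== SOURCE B (Python) =====
-- def print_last_digit(number):
--     return abs(number) % 10
-- ===== Notes on version B (the rewrite author's own statement) =====
-- stated objective: simpler
-- what changed: Replaced the string-length digit count and the repeated modulus loop by a single closed-form absolute-value modulus expression.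
import Mathlib
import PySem

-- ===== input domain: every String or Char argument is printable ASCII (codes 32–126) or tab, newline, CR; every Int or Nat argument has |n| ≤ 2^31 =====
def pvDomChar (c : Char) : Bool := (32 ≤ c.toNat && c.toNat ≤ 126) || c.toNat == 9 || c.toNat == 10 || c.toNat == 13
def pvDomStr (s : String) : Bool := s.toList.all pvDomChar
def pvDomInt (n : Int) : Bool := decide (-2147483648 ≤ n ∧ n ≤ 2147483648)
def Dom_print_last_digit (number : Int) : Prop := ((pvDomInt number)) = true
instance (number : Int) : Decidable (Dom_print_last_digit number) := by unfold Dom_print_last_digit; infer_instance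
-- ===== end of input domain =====

-- B replaces A's str()/len() digit count and repeated %-10 loop by the closed form abs(number) % 10 (simpler).

-- ===== PORT A =====
def print_last_digit (number : Int) : Int :=
  let mynumber := number
  let length : Int := (PySem.Int.toChars mynumber).length
  let mynumber := if mynumber < 0 then mynumber * -1 else mynumber
  (PySem.List.pyRange 0 (length - 1) 1).foldl (fun acc _ => PySem.Int.mod acc 10) mynumber

-- ===== PORT B =====
def print_last_digit_alt (number : Int) : Int :=
  PySem.Int.mod |number| 10

-- ===== PRECONDITION & SPEC =====
def Spec_print_last_digit (number : Int) (out : Int) : Prop := out = print_last_digit_alt number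
instance (number : Int) (out : Int) : Decidable (Spec_print_last_digit number out) := by unfold Spec_print_last_digit; infer_instance

-- ===== CLAIM (what is proved, stated in full; the proofs are below) =====
def Claim_equal_print_last_digit : Prop := ∀ (number : Int), Dom_print_last_digit number → Spec_print_last_digit number (print_last_digit number)

-- ===== LEMMAS AND PROOFS =====

-- Nat.toDigitsCore never shrinks its accumulator.
theorem toDigitsCore_len_mono (f : Nat) : ∀ (n : Nat) (acc : List Char),
    acc.length ≤ (Nat.toDigitsCore 10 f n acc).length := by
  induction f with
  | zero => intro n acc; simp [Nat.toDigitsCore]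
  | succ f ih =>
    intro n acc
    simp only [Nat.toDigitsCore]
    split
    · simp
    · exact le_trans (by simp) (ih (n / 10) ((n % 10).digitChar :: acc))

-- With positive fuel, toDigitsCore adds at least one character.
theorem toDigitsCore_len_pos (f : Nat) (n : Nat) (acc : List Char) (hf : 0 < f) :
    acc.length + 1 ≤ (Nat.toDigitsCore 10 f n acc).length := by
  cases f with
  | zero => omega
  | succ f =>
    simp only [Nat.toDigitsCore]
    split
    · simp
    · exact le_trans (by simp) (toDigitsCore_len_mono f (n / 10) ((n % 10).digitChar :: acc))

theorem toDigits_len_pos (n : Nat) : 1 ≤ (Nat.toDigits 10 n).length :=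
  toDigitsCore_len_pos (n + 1) n [] (Nat.succ_pos n)

-- One unfolding step of toDigitsCore at positive fuel.
theorem toDigitsCore_succ (f n : Nat) (acc : List Char) :
    Nat.toDigitsCore 10 (f + 1) n acc =
      if n / 10 = 0 then (n % 10).digitChar :: acc
      else Nat.toDigitsCore 10 f (n / 10) ((n % 10).digitChar :: acc) := rfl

-- A number ≥ 10 prints with at least two digits.
theorem toDigits_len_ge_two (n : Nat) (h : 10 ≤ n) : 2 ≤ (Nat.toDigits 10 n).length := by
  unfold Nat.toDigits
  rw [toDigitsCore_succ n n [], if_neg (by omega : ¬ n / 10 = 0)]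
  simpa using toDigitsCore_len_pos n (n / 10) [(n % 10).digitChar] (by omega)

-- Folding `% 10` over any list fixes a value already in [0, 10).
theorem foldl_mod_ten_fixed (l : List Int) (m : Int) (h0 : 0 ≤ m) (h10 : m < 10) :
    l.foldl (fun acc _ => PySem.Int.mod acc 10) m = m := by
  induction l with
  | nil => rfl
  | cons x xs ih =>
    have hm : PySem.Int.mod m 10 = m := by
      rw [PySem.Int.mod_eq_emod_of_pos (by omega)]
      exact Int.emod_eq_of_lt h0 h10
    simp only [List.foldl_cons]
    rw [hm]
    exact ih

-- A's loop result when it runs at least once: m % 10.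
theorem foldl_mod_ten_of_pos (k : Int) (m : Int) (_hm : 0 ≤ m) (hk : 1 ≤ k) :
    (PySem.List.pyRange 0 k 1).foldl (fun acc _ => PySem.Int.mod acc 10) m
      = PySem.Int.mod m 10 := by
  rw [PySem.List.pyRange_one_cons (by omega)]
  simp only [List.foldl_cons]
  exact foldl_mod_ten_fixed _ _ (PySem.Int.mod_nonneg _ (by omega))
    (PySem.Int.mod_lt _ (by omega))

-- ===== VERDICT (by name: the statement is the Claim_ definition above) =====
theorem print_last_digit_spec : Claim_equal_print_last_digit := by
  intro number _
  unfold Spec_print_last_digit print_last_digit print_last_digit_alt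
  simp only []
  by_cases hneg : number < 0
  · -- '-' sign plus at least one digit: the loop runs ≥ 1 times
    have hd := toDigits_len_pos number.natAbs
    have hlen : (2 : Int) ≤ (PySem.Int.toChars number).length := by
      simp only [PySem.Int.toChars, if_pos hneg, List.length_cons]
      exact_mod_cast Nat.succ_le_succ hd
    have habs : number * -1 = |number| := by rw [abs_of_neg hneg]; ring
    rw [if_pos hneg, habs, foldl_mod_ten_of_pos _ _ (abs_nonneg number) (by omega)]
  · rw [if_neg hneg]
    have hpos : 0 ≤ number := by omega
    have habs : |number| = number := abs_of_nonneg hpos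
    by_cases hsm : number < 10
    · -- single digit: the loop leaves the value unchanged, and % 10 is the identity on it
      rw [foldl_mod_ten_fixed _ _ hpos hsm, habs,
        PySem.Int.mod_eq_emod_of_pos (by omega), Int.emod_eq_of_lt hpos hsm]
    · -- at least two digits: the loop runs ≥ 1 times
      have hd := toDigits_len_ge_two number.toNat (by omega)
      have hlen : (2 : Int) ≤ (PySem.Int.toChars number).length := by
        simp only [PySem.Int.toChars, if_neg hneg]
        exact_mod_cast hd
      rw [foldl_mod_ten_of_pos _ _ hpos (by omega), habs]
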